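-- pv_equiv track=rewrite | github.com/YunzhenYang-collection/Data-Structure_Final-Project | mindy/mindy_flask/models/interview_mcp.py | parse_agent_history
-- ===== SOURCE A (Python) =====
-- def parse_agent_history(agent_history):
--     """
--     把 agent1.history 或 agent2.history 轉成 List[Dict] 格式
--     """
--     result = []
--     for msg in agent_history:
--         if msg.startswith("[system] "):
--             role = "system"
--             content = msg[len("[system] "):]
--         elif msg.startswith("[user] "):
--             role = "user"
--             content = msg[len("[user] "):]
--         elif msg.startswith("[ai_coach] "):
--             role = "ai_coach"
--             content = msg[len("[ai_coach] "):]
--         elif msg.startswith("[analysis_expert] "):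
--             role = "analysis_expert"
--             content = msg[len("[analysis_expert] "):]
--         else:
--             role = "unknown"
--             content = msg
--         result.append({"role": role, "content": content})
--     return result
-- ===== SOURCE B (Python) =====
-- # B: instead of testing each known prefix, parse the bracketed tag (first "] ")
-- # and look the tag up in a role set; unknown tags fall through unchanged.
-- ROLES = {"system", "user", "ai_coach", "analysis_expert"}
--
-- def _entry(msg):
--     i = msg.find("] ")
--     if msg.startswith("[") and i >= 0 and msg[1:i] in ROLES:
--         return {"role": msg[1:i], "content": msg[i + 2:]}
--     return {"role": "unknown", "content": msg}
--
-- def parse_agent_history(agent_history):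
--     return [_entry(msg) for msg in agent_history]
-- ===== Notes on version B (the rewrite author's own statement) =====
-- stated objective: alternative
-- what changed: Instead of testing the message against each of the four hard-coded role prefixes, B parses the bracketed tag once (first ']' followed by space) and looks it up in a role set, so the per-prefix comparisons disappear.
import Mathlib
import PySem

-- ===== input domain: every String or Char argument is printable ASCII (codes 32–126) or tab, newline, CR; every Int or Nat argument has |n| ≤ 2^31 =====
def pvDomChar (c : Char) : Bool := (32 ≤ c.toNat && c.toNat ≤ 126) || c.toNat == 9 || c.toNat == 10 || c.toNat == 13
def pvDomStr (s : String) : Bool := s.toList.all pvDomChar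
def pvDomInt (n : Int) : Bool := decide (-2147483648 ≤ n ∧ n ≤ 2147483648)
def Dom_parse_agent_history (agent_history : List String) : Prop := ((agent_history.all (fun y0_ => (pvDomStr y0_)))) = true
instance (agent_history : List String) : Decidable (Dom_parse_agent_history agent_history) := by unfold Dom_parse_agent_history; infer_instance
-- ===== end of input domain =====

-- B parses the bracketed tag once (first "] ") and looks it up in a role set instead of
-- testing the four hard-coded prefixes (alternative algorithm, same cost; return value only).


-- ===== PORT A =====
def parse_agent_history (agent_history : List String) : List (List (String × String)) :=
  agent_history.foldl (fun result msg =>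
    let rc : String × String :=
      if PySem.Str.startswith msg "[system] " then
        ("system", PySem.Str.slice msg (some (PySem.Str.len "[system] ")) none)
      else if PySem.Str.startswith msg "[user] " then
        ("user", PySem.Str.slice msg (some (PySem.Str.len "[user] ")) none)
      else if PySem.Str.startswith msg "[ai_coach] " then
        ("ai_coach", PySem.Str.slice msg (some (PySem.Str.len "[ai_coach] ")) none)
      else if PySem.Str.startswith msg "[analysis_expert] " then
        ("analysis_expert", PySem.Str.slice msg (some (PySem.Str.len "[analysis_expert] ")) none)
      else
        ("unknown", msg)
    result ++ [[("role", rc.1), ("content", rc.2)]]) []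

-- ===== PORT B =====
-- ROLES = {"system", "user", "ai_coach", "analysis_expert"}  (a Python set)
def pvRoles : PySem.Set String :=
  PySem.Set.ofList ["system", "user", "ai_coach", "analysis_expert"]

-- _entry(msg): find the first "] ", take the tag between '[' and it, look the tag up in pvRoles
def pvEntry (msg : String) : List (String × String) :=
  let i := PySem.Str.find msg "] "
  if PySem.Str.startswith msg "[" && decide ((0:Int) ≤ i)
      && PySem.Set.contains pvRoles (PySem.Str.slice msg (some 1) (some i)) then
    [("role", PySem.Str.slice msg (some 1) (some i)),
     ("content", PySem.Str.slice msg (some (i + 2)) none)]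
  else
    [("role", "unknown"), ("content", msg)]

def parse_agent_history_alt (agent_history : List String) : List (List (String × String)) :=
  agent_history.map pvEntry

-- ===== PRECONDITION & SPEC =====
def Spec_parse_agent_history (agent_history : List String) (out : List (List (String × String))) : Prop := out = parse_agent_history_alt agent_history
instance (agent_history : List String) (out : List (List (String × String))) : Decidable (Spec_parse_agent_history agent_history out) := by unfold Spec_parse_agent_history; infer_instance

-- ===== CLAIM (what is proved, stated in full; the proofs are below) =====
def Claim_equal_parse_agent_history : Prop := ∀ (agent_history : List String), Dom_parse_agent_history agent_history → Spec_parse_agent_history agent_history (parse_agent_history agent_history)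

-- ===== LEMMAS AND PROOFS =====
-- proof-only name for A's loop body (definitionally A's lambda result)
def pvBody (msg : String) : List (String × String) :=
  let rc : String × String :=
    if PySem.Str.startswith msg "[system] " then
      ("system", PySem.Str.slice msg (some (PySem.Str.len "[system] ")) none)
    else if PySem.Str.startswith msg "[user] " then
      ("user", PySem.Str.slice msg (some (PySem.Str.len "[user] ")) none)
    else if PySem.Str.startswith msg "[ai_coach] " then
      ("ai_coach", PySem.Str.slice msg (some (PySem.Str.len "[ai_coach] ")) none)
    else if PySem.Str.startswith msg "[analysis_expert] " then
      ("analysis_expert", PySem.Str.slice msg (some (PySem.Str.len "[analysis_expert] ")) none)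
    else
      ("unknown", msg)
  [("role", rc.1), ("content", rc.2)]

-- find points at the first occurrence, so the two facts below pin its value
theorem pv_find_eq (cs sub : List Char) (k : Nat)
    (hk : sub <+: cs.drop k) (hmin : ∀ i < k, ¬ sub <+: cs.drop i) :
    PySem.Chars.find cs sub = (k : Int) := by
  have hinf : PySem.Chars.isIn sub cs = true :=
    (PySem.Chars.exists_prefix_drop_iff_isIn sub cs).mp ⟨k, hk⟩
  have hnn : 0 ≤ PySem.Chars.find cs sub :=
    (PySem.Chars.find_nonneg_iff cs sub).mpr ((PySem.Chars.isIn_iff_infix sub cs).mp hinf)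
  obtain ⟨hpre, hm⟩ := PySem.Chars.find_spec (s := cs) (sub := sub) hnn
  have h1 : ¬ k < (PySem.Chars.find cs sub).toNat := fun h => hm k h hk
  have h2 : ¬ (PySem.Chars.find cs sub).toNat < k := fun h => hmin _ h hpre
  omega

-- the first "] " in '[' :: tag ++ ']' :: ' ' :: t is at index tag.length + 1
theorem pv_find_bracket (tag t : List Char) (hn : ']' ∉ tag) :
    PySem.Chars.find ('[' :: tag ++ ']' :: ' ' :: t) [']', ' ']
      = ((tag.length + 1 : Nat) : Int) := by
  apply pv_find_eq
  · have : ('[' :: tag ++ ']' :: ' ' :: t).drop (tag.length + 1) = ']' :: ' ' :: t := by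
      simp 
    rw [this]; exact ⟨t, rfl⟩
  · intro i hi hpre
    rcases i with _ | j
    · rcases hpre with ⟨u, hu⟩; simp at hu
    · have hj : j ≤ tag.length := by omega
      have hdrop : ('[' :: tag ++ ']' :: ' ' :: t).drop (j + 1)
          = tag.drop j ++ ']' :: ' ' :: t := by
        simp [List.drop_append_of_le_length hj]
      rw [hdrop] at hpre
      have hjlt : j < tag.length := by omega
      have hget : tag.drop j = tag[j] :: tag.drop (j + 1) := List.drop_eq_getElem_cons hjlt
      rw [hget] at hpre
      rcases hpre with ⟨u, hu⟩
      simp only [List.cons_append, List.nil_append] at hu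
      injection hu with h1 _
      exact hn (h1 ▸ List.getElem_mem hjlt)

-- if B's guard holds with tag, the message decomposes as '[' ++ tag ++ "] " ++ rest
theorem pv_decompose (msg tag : String)
    (h0 : PySem.Str.startswith msg "[" = true)
    (hi : 0 ≤ PySem.Str.find msg "] ")
    (htag : PySem.Str.slice msg (some 1) (some (PySem.Str.find msg "] ")) = tag) :
    ∃ rest : List Char, msg.toList = '[' :: tag.toList ++ ']' :: ' ' :: rest := by
  set cs := msg.toList with hcs
  have hsw : ['['] <+: cs := by
    have := (PySem.Chars.startswith_iff (s := cs) (p := ['['])) |>.mp (by simpa using h0)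
    simpa using this
  obtain ⟨cs', hcs'⟩ := hsw
  set i := PySem.Chars.find cs [']', ' '] with hidef
  have hieq : PySem.Str.find msg "] " = i := by simp [hidef, hcs]
  rw [hieq] at hi htag
  obtain ⟨hpre, -⟩ := PySem.Chars.find_spec (s := cs) (sub := [']', ' ']) hi
  obtain ⟨u, hu⟩ := hpre
  have hile : i ≤ cs.length := PySem.Chars.find_le_length cs [']', ' ']
  have hi1 : 1 ≤ i.toNat := by
    by_contra h
    have h0' : i.toNat = 0 := by omega
    rw [h0'] at hu
    simp at hu
    rw [← hcs'] at hu
    simp at hu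
  have hlen : i.toNat + 2 ≤ cs.length := by
    have := congrArg List.length hu
    simp at this
    omega
  -- the slice as a list
  have hslice : (tag.toList : List Char) = (cs.drop 1).take (i.toNat - 1) := by
    have : (PySem.Str.slice msg (some 1) (some i)).toList
        = PySem.List.slice cs (some 1) (some i) := by simp [hcs]
    rw [htag] at this
    rw [this, PySem.List.slice_toNat cs (by norm_num) hi]
    norm_num
  have htaglen : tag.toList.length = i.toNat - 1 := by
    have : ((cs.drop 1).take (i.toNat - 1)).length = i.toNat - 1 := by
      simp; omega
    rw [hslice, this]
  refine ⟨u, ?_⟩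
  have hcseq : cs = '[' :: cs' := by simpa using hcs'.symm
  have hdrop1 : cs.drop 1 = cs' := by rw [hcseq]; rfl
  have hu' : cs.drop i.toNat = ']' :: ' ' :: u := by simpa using hu.symm
  rw [hcseq]
  show '[' :: cs' = ('[' :: tag.toList) ++ ']' :: ' ' :: u
  simp only [List.cons_append]
  congr 1
  calc cs' = cs'.take (i.toNat - 1) ++ cs'.drop (i.toNat - 1) := (List.take_append_drop _ _).symm
    _ = tag.toList ++ cs.drop i.toNat := by
        rw [← hdrop1, ← hslice, List.drop_drop]
        congr 2
        omega
    _ = tag.toList ++ ']' :: ' ' :: u := by rw [hu']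

-- a decomposed message starts with the corresponding A-prefix
theorem pv_startswith_of_parts (msg tag pre : String) (rest : List Char)
    (hpre : pre.toList = '[' :: tag.toList ++ [']', ' '])
    (h : msg.toList = '[' :: tag.toList ++ ']' :: ' ' :: rest) :
    PySem.Str.startswith msg pre = true := by
  have : pre.toList <+: msg.toList := by
    rw [hpre, h]; exact ⟨rest, by simp⟩
  simpa using (PySem.Chars.startswith_iff (s := msg.toList) (p := pre.toList)).mpr this

-- the matched case: message = '[' ++ tag ++ "] " ++ t with a known tag
theorem pv_entry_matched (msg tag : String) (t : List Char)
    (hn : ']' ∉ tag.toList)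
    (hmem : PySem.Set.contains pvRoles tag = true)
    (h : msg.toList = '[' :: tag.toList ++ ']' :: ' ' :: t) :
    pvEntry msg = [("role", tag),
      ("content", PySem.Str.slice msg (some ((tag.toList.length : Int) + 3)) none)] := by
  have hfind : PySem.Str.find msg "] " = ((tag.toList.length + 1 : Nat) : Int) := by
    have : PySem.Str.find msg "] " = PySem.Chars.find msg.toList [']', ' '] := by simp
    rw [this, h]
    exact pv_find_bracket tag.toList t hn
  have hsw : PySem.Str.startswith msg "[" = true := by
    have : ('[' : Char) :: [] <+: msg.toList := by rw [h]; exact ⟨_, rfl⟩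
    simpa using (PySem.Chars.startswith_iff (s := msg.toList) (p := ['['])).mpr this
  have hslice : PySem.Str.slice msg (some 1) (some ((tag.toList.length + 1 : Nat) : Int)) = tag := by
    apply String.toList_inj.mp
    have : (PySem.Str.slice msg (some 1) (some ((tag.toList.length + 1 : Nat) : Int))).toList
        = PySem.List.slice msg.toList (some 1) (some ((tag.toList.length + 1 : Nat) : Int)) := by simp
    rw [this, PySem.List.slice_toNat _ (by norm_num) (by positivity), h]
    simp
  simp only [pvEntry, hfind, hslice, hsw, hmem]
  norm_num
  rw [if_pos (by positivity), show ((tag.length : Int) + 1 + 2) = (tag.length : Int) + 3 from by ring]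

-- per message, A's if/elif chain equals B's parse-and-look-up
set_option maxHeartbeats 1000000 in
theorem pv_body_eq (msg : String) : pvBody msg = pvEntry msg := by
  by_cases h1 : PySem.Str.startswith msg "[system] " = true
  · obtain ⟨t, ht⟩ := (PySem.Chars.startswith_iff (s := msg.toList) (p := "[system] ".toList)).mp (by simpa using h1)
    have hb := pv_entry_matched msg "system" t (by decide) (by decide) (by rw [← ht]; rfl)
    simp only [pvBody, h1, if_true, hb]
    rw [show ((("system" : String).toList.length : Int) + 3) = (PySem.Str.len "[system] " : Int) from by decide]
  · by_cases h2 : PySem.Str.startswith msg "[user] " = true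
    · obtain ⟨t, ht⟩ := (PySem.Chars.startswith_iff (s := msg.toList) (p := "[user] ".toList)).mp (by simpa using h2)
      have hb := pv_entry_matched msg "user" t (by decide) (by decide) (by rw [← ht]; rfl)
      simp only [pvBody, h1, h2, if_true, hb]
      rw [show ((("user" : String).toList.length : Int) + 3) = (PySem.Str.len "[user] " : Int) from by decide]
      simp
    · by_cases h3 : PySem.Str.startswith msg "[ai_coach] " = true
      · obtain ⟨t, ht⟩ := (PySem.Chars.startswith_iff (s := msg.toList) (p := "[ai_coach] ".toList)).mp (by simpa using h3)
        have hb := pv_entry_matched msg "ai_coach" t (by decide) (by decide) (by rw [← ht]; rfl)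
        simp only [pvBody, h1, h2, h3, if_true, hb]
        rw [show ((("ai_coach" : String).toList.length : Int) + 3) = (PySem.Str.len "[ai_coach] " : Int) from by decide]
        simp
      · by_cases h4 : PySem.Str.startswith msg "[analysis_expert] " = true
        · obtain ⟨t, ht⟩ := (PySem.Chars.startswith_iff (s := msg.toList) (p := "[analysis_expert] ".toList)).mp (by simpa using h4)
          have hb := pv_entry_matched msg "analysis_expert" t (by decide) (by decide) (by rw [← ht]; rfl)
          simp only [pvBody, h1, h2, h3, h4, if_true, hb]
          rw [show ((("analysis_expert" : String).toList.length : Int) + 3) = (PySem.Str.len "[analysis_expert] " : Int) from by decide]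
          simp
        · -- no prefix matches: B's guard cannot hold
          simp only [pvBody, h1, h2, h3, h4]
          unfold pvEntry
          by_cases hg : (PySem.Str.startswith msg "[" && decide ((0:Int) ≤ PySem.Str.find msg "] ")
              && PySem.Set.contains pvRoles (PySem.Str.slice msg (some 1) (some (PySem.Str.find msg "] ")))) = true
          · exfalso
            have hg' := hg
            simp only [Bool.and_eq_true, decide_eq_true_eq] at hg'
            obtain ⟨⟨hsw, hge⟩, hmem⟩ := hg'
            set tag := PySem.Str.slice msg (some 1) (some (PySem.Str.find msg "] ")) with htagdef
            obtain ⟨rest, hdec⟩ := pv_decompose msg tag hsw hge rfl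
            have hpv : pvRoles = ["system", "user", "ai_coach", "analysis_expert"] := by decide
            rw [hpv] at hmem
            have hmem' : tag ∈ (["system", "user", "ai_coach", "analysis_expert"] : List String) := by
              simpa [PySem.Set.contains] using hmem
            simp only [List.mem_cons, List.not_mem_nil, or_false] at hmem'
            rcases hmem' with h | h | h | h
            · exact h1 (pv_startswith_of_parts msg tag "[system] " rest (by rw [h]; decide) hdec)
            · exact h2 (pv_startswith_of_parts msg tag "[user] " rest (by rw [h]; decide) hdec)
            · exact h3 (pv_startswith_of_parts msg tag "[ai_coach] " rest (by rw [h]; decide) hdec)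
            · exact h4 (pv_startswith_of_parts msg tag "[analysis_expert] " rest (by rw [h]; decide) hdec)
          · rw [if_neg (by simp)]
            simp only [Bool.false_eq_true, if_false]
            rw [if_neg hg]

-- ===== VERDICT (by name: the statement is the Claim_ definition above) =====
theorem parse_agent_history_spec : Claim_equal_parse_agent_history := by
  intro agent_history _
  show parse_agent_history agent_history = parse_agent_history_alt agent_history
  have hA : parse_agent_history agent_history
      = agent_history.foldl (fun result msg => result ++ [pvBody msg]) [] := rfl
  rw [hA, PySem.List.foldl_append_singleton_eq_map, parse_agent_history_alt]
  exact List.map_congr_left (fun x _ => pv_body_eq x)
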